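-- pv_equiv track=rewrite | github.com/wjchi1/intro_speech_understanding | 2024_fall/lec03/homework3.py | cancellation
-- ===== SOURCE A (Python) =====
-- def cancellation(list, stop_word):
--     output_list = []
--     for elements in list:
--         if elements == stop_word:
--             break
--         else:
--             output_list.append(elements)
--     return output_list
--     '''
--     Copy elements one by one from input_list into output_list.
--     If one of the elements is equal to the stop_word, then stop the function,
--     and return what you have so far.
--     '''
-- ===== SOURCE B (Python) =====
-- def cancellation(list, stop_word):
--     if stop_word in list:
--         return list[:list.index(stop_word)]
--     return list[:]
-- ===== Notes on version B (the rewrite author's own statement) =====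
-- stated objective: idiomatic
-- what changed: Replaced the element-by-element copy loop with an early break by a membership test plus a single bulk slice up to list.index(stop_word) (or a full-copy slice when absent).
import Mathlib
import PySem

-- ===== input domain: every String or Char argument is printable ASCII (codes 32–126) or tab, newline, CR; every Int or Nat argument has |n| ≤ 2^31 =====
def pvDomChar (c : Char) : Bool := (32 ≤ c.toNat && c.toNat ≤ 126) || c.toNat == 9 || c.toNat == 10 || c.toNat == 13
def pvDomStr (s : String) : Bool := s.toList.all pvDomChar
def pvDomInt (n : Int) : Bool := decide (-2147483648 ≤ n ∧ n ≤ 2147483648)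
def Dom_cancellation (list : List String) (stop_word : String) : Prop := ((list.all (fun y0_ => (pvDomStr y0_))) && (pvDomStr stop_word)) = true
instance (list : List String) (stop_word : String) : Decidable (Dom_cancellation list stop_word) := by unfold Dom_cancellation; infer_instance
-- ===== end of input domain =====

-- B replaces A's element-by-element copy loop (with early break) by a membership test
-- and one bulk prefix slice; objective: idiomatic.

-- ===== PORT A =====
-- A's for-loop with break, as structural recursion over the list carrying the output accumulator
def cancellationLoop (l : List String) (stop_word : String) (output_list : List String) : List String :=
  match l with
  | [] => output_list
  | elements :: rest =>
    if elements == stop_word then output_list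
    else cancellationLoop rest stop_word (output_list ++ [elements])

def cancellation (list : List String) (stop_word : String) : List String :=
  cancellationLoop list stop_word []

-- ===== PORT B =====
def cancellation_alt (list : List String) (stop_word : String) : List String :=
  if list.contains stop_word then
    match PySem.List.index? list stop_word with
    | some k => PySem.List.slice list none (some (k : Int))
    | none => PySem.List.slice list none none
  else PySem.List.slice list none none

-- ===== PRECONDITION & SPEC =====
def Spec_cancellation (list : List String) (stop_word : String) (out : List String) : Prop := out = cancellation_alt list stop_word
instance (list : List String) (stop_word : String) (out : List String) : Decidable (Spec_cancellation list stop_word out) := by unfold Spec_cancellation; infer_instance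

-- ===== CLAIM (what is proved, stated in full; the proofs are below) =====
def Claim_equal_cancellation : Prop := ∀ (list : List String) (stop_word : String), Dom_cancellation list stop_word → Spec_cancellation list stop_word (cancellation list stop_word)

-- ===== LEMMAS AND PROOFS =====
theorem cancellationLoop_acc (l : List String) (sw : String) (acc : List String) :
    cancellationLoop l sw acc = acc ++ cancellationLoop l sw [] := by
  induction l generalizing acc with
  | nil => simp [cancellationLoop]
  | cons x xs ih =>
    by_cases h : x == sw <;> simp [cancellationLoop, h]
    rw [ih [x], ih (acc ++ [x])]
    simp

theorem cancellation_eq_takeWhile (l : List String) (sw : String) :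
    cancellation l sw = l.takeWhile (fun x => ¬ x = sw) := by
  induction l with
  | nil => rfl
  | cons x xs ih =>
    unfold cancellation at *
    rw [List.takeWhile_cons]
    by_cases h : x = sw
    · subst h; simp [cancellationLoop]
    · have hb : (x == sw) = false := by simp [h]
      simp only [cancellationLoop, hb, Bool.false_eq_true, if_false, List.nil_append]
      rw [cancellationLoop_acc, ih]
      simp [h]

theorem takeWhile_prefix_stop (pre suf : List String) (sw : String) (hnot : sw ∉ pre) :
    (pre ++ sw :: suf).takeWhile (fun x => ¬ x = sw) = pre := by
  induction pre with
  | nil => simp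
  | cons p ps ih =>
    simp only [List.mem_cons, not_or] at hnot
    have hp : ¬ p = sw := fun h => hnot.1 h.symm
    simp only [List.cons_append, List.takeWhile_cons, hp, decide_false, Bool.not_false,
      decide_not, if_true, List.cons.injEq, true_and]
    simpa [decide_not] using ih hnot.2

theorem alt_eq_takeWhile (l : List String) (sw : String) :
    cancellation_alt l sw = l.takeWhile (fun x => ¬ x = sw) := by
  unfold cancellation_alt
  by_cases hm : sw ∈ l
  · simp only [List.contains_eq_mem, hm, decide_true, if_true]
    rcases hk : PySem.List.index? l sw with _ | k
    · rw [PySem.List.index?_eq_none_iff] at hk; exact absurd hm hk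
    · rw [PySem.List.index?_eq_some_iff] at hk
      obtain ⟨pre, suf, rfl, hlen, hnot⟩ := hk
      subst hlen
      show PySem.List.slice (pre ++ sw :: suf) none (some ((pre.length : Nat) : Int)) = _
      rw [PySem.List.slice_to_natCast, List.take_left, takeWhile_prefix_stop _ _ _ hnot]
  · simp only [List.contains_eq_mem, hm, decide_false, Bool.false_eq_true, if_false,
      PySem.List.slice_none_none]
    symm
    rw [List.takeWhile_eq_self_iff]
    intro x hx
    simp only [decide_eq_true_eq]
    exact fun h => hm (h ▸ hx)

-- ===== VERDICT (by name: the statement is the Claim_ definition above) =====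
theorem cancellation_spec : Claim_equal_cancellation := by
  intro l sw _
  unfold Spec_cancellation
  rw [cancellation_eq_takeWhile, alt_eq_takeWhile]
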